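-- pv_equiv track=rewrite | github.com/rezahh107/student-mentor-allocation-system | tools/ci/parse_pytest_summary.py | format_evidence_lines
-- ===== SOURCE A (Python) =====
-- from typing import Dict, Iterable, List, Tuple
--
-- def format_evidence_lines(
--     sections: Dict[str, bool], provided: Iterable[str]
-- ) -> List[str]:
--     lines: List[str] = []
--     for name, present in sections.items():
--         status = "✅" if present else "❌"
--         lines.append(f"- {status} AGENTS.md::{name}")
--     for item in provided:
--         prefix = "✅" if item else "❌"
--         lines.append(f"- {prefix} {item or 'Evidence missing'}")
--     if not any("AGENTS.md" in line for line in lines):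
--         lines.append("- ❌ AGENTS.md evidence missing")
--     return lines
-- ===== SOURCE B (Python) =====
-- def format_evidence_lines(sections, provided):
--     lines = []
--     has_agents = False
--     for name, present in sections.items():
--         status = "\u2705" if present else "\u274c"
--         lines.append(f"- {status} AGENTS.md::{name}")
--         has_agents = True
--     for item in provided:
--         if item:
--             lines.append(f"- \u2705 {item}")
--             if "AGENTS.md" in item:
--                 has_agents = True
--         else:
--             lines.append("- \u274c Evidence missing")
--     if not has_agents:
--         lines.append("- \u274c AGENTS.md evidence missing")
--     return lines
-- ===== Notes on version B (the rewrite author's own statement) =====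
-- stated objective: alternative
-- what changed: Replaced the final any(...) scan over all produced lines with a has_agents boolean flag maintained in one pass while the lines are built (set unconditionally for section lines, and for provided items exactly when the item is truthy and contains 'AGENTS.md').
import Mathlib
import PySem

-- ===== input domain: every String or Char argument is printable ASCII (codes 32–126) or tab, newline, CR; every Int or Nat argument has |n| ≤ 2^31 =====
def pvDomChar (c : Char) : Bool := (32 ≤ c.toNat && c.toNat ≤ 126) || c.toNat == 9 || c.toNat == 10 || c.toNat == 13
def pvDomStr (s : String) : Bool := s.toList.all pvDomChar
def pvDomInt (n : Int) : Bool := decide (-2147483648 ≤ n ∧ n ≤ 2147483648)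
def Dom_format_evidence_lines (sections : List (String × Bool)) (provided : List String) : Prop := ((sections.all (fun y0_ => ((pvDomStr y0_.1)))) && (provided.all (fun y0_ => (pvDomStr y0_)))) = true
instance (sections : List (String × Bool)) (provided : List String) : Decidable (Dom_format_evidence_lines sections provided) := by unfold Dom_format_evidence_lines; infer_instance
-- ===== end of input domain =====

-- B replaces A's final any(...) scan over the produced lines with a has_agents flag
-- maintained while the lines are built (alternative decomposition; same cost class).

-- ===== PORT A =====
def format_evidence_lines (sections : List (String × Bool)) (provided : List String) : List String :=
  let lines : List String := []
  let lines := sections.foldl (fun lines nv =>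
    let status := if nv.2 then "✅" else "❌"
    lines ++ ["- " ++ status ++ " AGENTS.md::" ++ nv.1]) lines
  let lines := provided.foldl (fun lines item =>
    let pfx := if item ≠ "" then "✅" else "❌"
    lines ++ ["- " ++ pfx ++ " " ++ (if item ≠ "" then item else "Evidence missing")]) lines
  if !(lines.any (fun line => PySem.Str.isIn "AGENTS.md" line)) then
    lines ++ ["- ❌ AGENTS.md evidence missing"]
  else
    lines

-- ===== PORT B =====
def format_evidence_lines_alt (sections : List (String × Bool)) (provided : List String) : List String :=
  let st : List String × Bool := ([], false)
  let st := sections.foldl (fun (st : List String × Bool) nv =>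
    let status := if nv.2 then "✅" else "❌"
    (st.1 ++ ["- " ++ status ++ " AGENTS.md::" ++ nv.1], true)) st
  let st := provided.foldl (fun (st : List String × Bool) item =>
    if item ≠ "" then
      (st.1 ++ ["- ✅ " ++ item], st.2 || PySem.Str.isIn "AGENTS.md" item)
    else
      (st.1 ++ ["- ❌ Evidence missing"], st.2)) st
  if !st.2 then st.1 ++ ["- ❌ AGENTS.md evidence missing"] else st.1

-- ===== PRECONDITION & SPEC =====
def Spec_format_evidence_lines (sections : List (String × Bool)) (provided : List String) (out : List String) : Prop := out = format_evidence_lines_alt sections provided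
instance (sections : List (String × Bool)) (provided : List String) (out : List String) : Decidable (Spec_format_evidence_lines sections provided out) := by unfold Spec_format_evidence_lines; infer_instance

-- ===== CLAIM (what is proved, stated in full; the proofs are below) =====
def Claim_equal_format_evidence_lines : Prop := ∀ (sections : List (String × Bool)) (provided : List String), Dom_format_evidence_lines sections provided → Spec_format_evidence_lines sections provided (format_evidence_lines sections provided)

-- ===== LEMMAS AND PROOFS =====

-- the line both programs build for a section entry
def pvSecLine (nv : String × Bool) : String :=
  "- " ++ (if nv.2 then "✅" else "❌") ++ " AGENTS.md::" ++ nv.1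

-- the line both programs build for a provided item (B's phrasing)
def pvProvLine (item : String) : String :=
  if item ≠ "" then "- ✅ " ++ item else "- ❌ Evidence missing"

-- B's per-item flag contribution
def pvQ (item : String) : Bool :=
  if item ≠ "" then PySem.Str.isIn "AGENTS.md" item else false

-- appending any suffix keeps "AGENTS.md" present
theorem secLine_isIn_aux (st name : String) (h : PySem.Str.isIn "AGENTS.md" st = true) :
    PySem.Str.isIn "AGENTS.md" (st ++ name) = true := by
  rw [PySem.Str.isIn_iff_infix] at *
  simp only [String.toList_append]
  obtain ⟨l, r, hh⟩ := h
  exact ⟨l, r ++ name.toList, by rw [← hh]; simp⟩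

-- prefixing with an 'A'-free string does not change whether "AGENTS.md" occurs
theorem provLine_isIn_aux (p item : String) (hp : ∀ c ∈ p.toList, c ≠ 'A') :
    PySem.Str.isIn "AGENTS.md" (p ++ item) = PySem.Str.isIn "AGENTS.md" item := by
  have key : PySem.Chars.isIn "AGENTS.md".toList (p.toList ++ item.toList) = true ↔
      PySem.Chars.isIn "AGENTS.md".toList item.toList = true := by
    rw [← PySem.Chars.exists_prefix_drop_iff_isIn, ← PySem.Chars.exists_prefix_drop_iff_isIn]
    constructor
    · rintro ⟨j, t, ht⟩
      by_cases hj : p.toList.length ≤ j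
      · refine ⟨j - p.toList.length, t, ?_⟩
        rw [List.drop_append, List.drop_eq_nil_of_le hj, List.nil_append] at ht
        exact ht
      · exfalso
        rw [List.drop_append, Nat.sub_eq_zero_of_le (by omega), List.drop_zero] at ht
        rcases hc : p.toList.drop j with _ | ⟨c, cs⟩
        · have h0 : p.toList.length - j = 0 := by
            rw [← List.length_drop, hc]; rfl
          omega
        · rw [hc] at ht
          have hcA : c = 'A' := by
            have := congrArg (fun l => l.head?) ht
            simpa using this.symm
          exact hp c (List.drop_subset j p.toList (hc ▸ List.mem_cons_self ..)) hcA
    · rintro ⟨j, t, ht⟩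
      refine ⟨p.toList.length + j, t, ?_⟩
      rw [List.drop_append, List.drop_eq_nil_of_le (by omega), List.nil_append,
        Nat.add_sub_cancel_left]
      exact ht
  have h1 := PySem.Str.isIn_iff_infix "AGENTS.md" (p ++ item)
  have h2 := PySem.Str.isIn_iff_infix "AGENTS.md" item
  rw [← PySem.Chars.isIn_iff_infix] at h1 h2
  simp only [String.toList_append] at h1
  cases hA : PySem.Str.isIn "AGENTS.md" (p ++ item) <;>
    cases hB : PySem.Str.isIn "AGENTS.md" item <;> simp_all

theorem isIn_pvSecLine (nv : String × Bool) :
    PySem.Str.isIn "AGENTS.md" (pvSecLine nv) = true := by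
  rcases nv with ⟨name, present⟩
  unfold pvSecLine
  cases present
  · exact secLine_isIn_aux ("- " ++ "❌" ++ " AGENTS.md::") name (by decide)
  · exact secLine_isIn_aux ("- " ++ "✅" ++ " AGENTS.md::") name (by decide)

set_option maxRecDepth 4096 in
theorem isIn_pvProvLine (item : String) :
    PySem.Str.isIn "AGENTS.md" (pvProvLine item) = pvQ item := by
  unfold pvProvLine pvQ
  by_cases h : item = ""
  · rw [if_neg (by simp [h]), if_neg (by simp [h])]
    decide
  · rw [if_pos h, if_pos h]
    exact provLine_isIn_aux "- ✅ " item (by intro c hc; fin_cases hc <;> decide)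

-- A's first loop builds the section lines
theorem A_sec_fold (l : List (String × Bool)) (acc : List String) :
    l.foldl (fun lines nv =>
      lines ++ ["- " ++ (if nv.2 then "✅" else "❌") ++ " AGENTS.md::" ++ nv.1]) acc = acc ++ l.map pvSecLine := by
  induction l generalizing acc with
  | nil => simp
  | cons x t ih => simp [ih, pvSecLine]

-- A's second loop builds the provided lines (same strings as B's phrasing)
theorem A_prov_fold (l : List String) (acc : List String) :
    l.foldl (fun lines item =>
      lines ++ ["- " ++ (if item ≠ "" then "✅" else "❌") ++ " "
        ++ (if item ≠ "" then item else "Evidence missing")]) acc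
      = acc ++ l.map pvProvLine := by
  induction l generalizing acc with
  | nil => simp
  | cons x t ih =>
    rw [List.foldl_cons]
    by_cases h : x = ""
    · rw [if_neg (by simp [h]), if_neg (by simp [h]), ih]
      simp [pvProvLine, h]
    · rw [if_pos h, if_pos h, ih]
      simp [pvProvLine, h]

-- B's first loop: same lines, flag = "saw a section"
theorem B_sec_fold (l : List (String × Bool)) (acc : List String) (b : Bool) :
    l.foldl (fun (st : List String × Bool) nv =>
      (st.1 ++ ["- " ++ (if nv.2 then "✅" else "❌") ++ " AGENTS.md::" ++ nv.1], true)) (acc, b)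
      = (acc ++ l.map pvSecLine, b || !l.isEmpty) := by
  induction l generalizing acc b with
  | nil => simp
  | cons x t ih => simp [ih, pvSecLine]

-- B's second loop: same lines, flag picks up items containing "AGENTS.md"
theorem B_prov_fold (l : List String) (acc : List String) (b : Bool) :
    l.foldl (fun (st : List String × Bool) item =>
      if item ≠ "" then
        (st.1 ++ ["- ✅ " ++ item], st.2 || PySem.Str.isIn "AGENTS.md" item)
      else
        (st.1 ++ ["- ❌ Evidence missing"], st.2)) (acc, b)
      = (acc ++ l.map pvProvLine, b || l.any pvQ) := by
  induction l generalizing acc b with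
  | nil => simp
  | cons x t ih =>
    rw [List.foldl_cons]
    by_cases h : x = ""
    · rw [if_neg (by simp [h]), ih]
      simp [pvProvLine, pvQ, h]
    · rw [if_pos h, ih]
      simp [pvProvLine, pvQ, h, Bool.or_assoc]

-- A's final any-scan over the section lines
theorem any_sec (l : List (String × Bool)) :
    (l.map pvSecLine).any (fun line => PySem.Str.isIn "AGENTS.md" line) = !l.isEmpty := by
  induction l with
  | nil => simp
  | cons x t ih =>
    rw [List.map_cons, List.any_cons, isIn_pvSecLine]
    simp

-- A's final any-scan over the provided lines
theorem any_prov (l : List String) :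
    (l.map pvProvLine).any (fun line => PySem.Str.isIn "AGENTS.md" line) = l.any pvQ := by
  induction l with
  | nil => simp
  | cons x t ih =>
    rw [List.map_cons, List.any_cons, isIn_pvProvLine, ih, List.any_cons]

-- ===== VERDICT (by name: the statement is the Claim_ definition above) =====
theorem format_evidence_lines_spec : Claim_equal_format_evidence_lines := by
  intro sections provided _
  unfold Spec_format_evidence_lines
  simp only [format_evidence_lines, format_evidence_lines_alt]
  rw [A_sec_fold, A_prov_fold, B_sec_fold, B_prov_fold]
  rw [List.nil_append, List.any_append, any_sec, any_prov]
  simp
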